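-- pv_equiv track=rewrite | github.com/openKinetics/webKinPred | api/KinForm/code/utils/mixup.py | _unique_seqs
-- ===== SOURCE A (Python) =====
-- from typing import Iterable, Optional, Sequence, Tuple, Dict, List
--
-- def _unique_seqs(seqs: List[str]) -> Tuple[List[str], Dict[int, int]]:
--     uniq, m, pos = [], {}, {}
--     for i, s in enumerate(seqs):
--         j = pos.get(s)
--         if j is None:
--             j = len(uniq)
--             uniq.append(s)
--             pos[s] = j
--         m[i] = j
--     return uniq, m
-- ===== SOURCE B (Python) =====
-- def _unique_seqs(seqs):
--     n = len(seqs)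
--     # sort (string, index) pairs: equal strings become adjacent runs, indices ascending
--     pairs = sorted((s, i) for i, s in enumerate(seqs))
--     # propagate each run's head (the minimal index = the first occurrence) across the run
--     owner = [0] * n          # owner[i] = index of the first occurrence of seqs[i]
--     run = 0
--     prev = None
--     for s, i in pairs:
--         if prev is None or s != prev:
--             run, prev = i, s
--         owner[i] = run
--     firsts = sorted(set(owner))          # first-occurrence indices, in original order
--     uniq = [seqs[f] for f in firsts]
--     rank = [0] * n
--     for r, f in enumerate(firsts):
--         rank[f] = r
--     return uniq, {i: rank[owner[i]] for i in range(n)}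
-- ===== Notes on version B (the rewrite author's own statement) =====
-- stated objective: alternative
-- what changed: A's hash-based single pass (uniq, a position dict and m maintained together, one dict lookup per element) is replaced by a sort-and-group algorithm: (string, index) pairs are sorted so equal strings form runs with ascending indices, each run's minimal index (the first occurrence) is propagated across its run into an owner array, and uniq, a rank array and m are then read off by indexing - no position dictionary or hash lookup exists at all.
import Mathlib
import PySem

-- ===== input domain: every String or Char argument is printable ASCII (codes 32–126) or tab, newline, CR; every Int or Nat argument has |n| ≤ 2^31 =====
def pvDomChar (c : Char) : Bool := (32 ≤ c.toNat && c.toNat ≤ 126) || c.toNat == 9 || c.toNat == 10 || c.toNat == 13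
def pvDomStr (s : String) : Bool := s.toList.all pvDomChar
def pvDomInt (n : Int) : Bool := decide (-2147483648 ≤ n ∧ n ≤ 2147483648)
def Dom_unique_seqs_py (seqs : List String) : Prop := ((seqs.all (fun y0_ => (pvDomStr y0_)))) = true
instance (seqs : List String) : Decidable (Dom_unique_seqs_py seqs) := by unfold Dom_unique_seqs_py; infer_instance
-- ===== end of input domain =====

-- B replaces A's hash-based single pass (uniq/pos/m maintained together, a position dict
-- looked up per element) by sorting: (string, index) pairs are sorted so equal strings form
-- runs, each run's minimal index (its first occurrence) is propagated across the run, and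
-- uniq/rank/m are then read off arrays — no position dictionary at all.
-- Objective: alternative (sorting/grouping instead of hashing; not claimed faster).

-- ===== PORT A =====
-- one loop iteration of A: state is (uniq, m, pos)
def pvAStep (st : List String × PySem.Dict Int Int × PySem.Dict String Int)
    (p : Int × String) : List String × PySem.Dict Int Int × PySem.Dict String Int :=
  match st.2.2.get? p.2 with
  | none =>
      let j : Int := st.1.length
      (st.1 ++ [p.2], st.2.1.insert p.1 j, st.2.2.insert p.2 j)
  | some j => (st.1, st.2.1.insert p.1 j, st.2.2)

def unique_seqs_py (seqs : List String) : List String × (List (Int × Int)) :=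
  let st := (PySem.List.enumerate seqs).foldl pvAStep ([], PySem.Dict.empty, PySem.Dict.empty)
  (st.1, st.2.1.items)

-- ===== PORT B =====
-- Python 'l[i] = v' (every write in B has 0 <= i < len(l), where it is exactly List.set)
def pvSetAt (l : List Int) (i v : Int) : List Int := l.set i.toNat v

-- one iteration of B's run-propagation loop: state is (owner, run, prev)
def pvBStep (st : List Int × Int × Option String) (p : String × Int) :
    List Int × Int × Option String :=
  let rn := if st.2.2 = none ∨ ¬ st.2.2 = some p.1 then (p.2, some p.1) else st.2
  (pvSetAt st.1 p.2 rn.1, rn)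

-- pairs = sorted((s, i) for i, s in enumerate(seqs))
def pvBPairs (seqs : List String) : List (String × Int) :=
  PySem.List.sorted2 ((PySem.List.enumerate seqs).map (fun p => (p.2, p.1))) Prod.fst Prod.snd
-- owner after the run loop over pairs (owner[i] = first occurrence of seqs[i])
def pvBOwner (seqs : List String) : List Int :=
  ((pvBPairs seqs).foldl pvBStep
    (PySem.List.pyRepeat [(0 : Int)] (seqs.length : Int), (0 : Int), (none : Option String))).1
-- firsts = sorted(set(owner))
def pvBFirsts (seqs : List String) : List Int :=
  PySem.List.sorted (PySem.Set.ofList (pvBOwner seqs)) (fun x => x)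
-- rank array: rank[f] = r for r, f in enumerate(firsts)
def pvBRank (seqs : List String) : List Int :=
  (PySem.List.enumerate (pvBFirsts seqs)).foldl (fun l p => pvSetAt l p.2 p.1)
    (PySem.List.pyRepeat [(0 : Int)] (seqs.length : Int))
-- list reads below are at indices that are always in range; '(pyGet? _).getD _' is their total form
def unique_seqs_py_alt (seqs : List String) : List String × (List (Int × Int)) :=
  ((pvBFirsts seqs).map (fun f => (PySem.List.pyGet? seqs f).getD ""),
   ((PySem.List.pyRange 0 (seqs.length : Int)).foldl
      (fun d i => d.insert i
        ((PySem.List.pyGet? (pvBRank seqs)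
          ((PySem.List.pyGet? (pvBOwner seqs) i).getD 0)).getD 0))
      PySem.Dict.empty).items)

-- ===== PRECONDITION & SPEC =====
def Spec_unique_seqs_py (seqs : List String) (out : List String × (List (Int × Int))) : Prop := out = unique_seqs_py_alt seqs
instance (seqs : List String) (out : List String × (List (Int × Int))) : Decidable (Spec_unique_seqs_py seqs out) := by unfold Spec_unique_seqs_py; infer_instance

-- ===== CLAIM (what is proved, stated in full; the proofs are below) =====
def Claim_equal_unique_seqs_py : Prop := ∀ (seqs : List String), Dom_unique_seqs_py seqs → Spec_unique_seqs_py seqs (unique_seqs_py seqs)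

-- ===== LEMMAS AND PROOFS =====

-- index (as Int) of s in the deduplicated list u (0 when absent; only used where s ∈ u)
def pvIdx (u : List String) (s : String) : Int := ((PySem.List.index? u s).getD 0 : Nat)

lemma pv_index?_update_of_mem (u : List String) (xs : List String) (s : String) (hs : s ∈ u) :
    PySem.List.index? (PySem.Set.update u xs) s = PySem.List.index? u s := by
  rw [PySem.Set.update_eq_append_filter, PySem.List.index?_append_of_mem _ hs]

lemma pv_index?_append_singleton (u : List String) (x s : String) (hne : s ≠ x) :
    PySem.List.index? (u ++ [x]) s = PySem.List.index? u s := by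
  by_cases hs : s ∈ u
  · exact PySem.List.index?_append_of_mem _ hs
  · rw [(PySem.List.index?_eq_none_iff _ _).2 hs,
      (PySem.List.index?_eq_none_iff _ _).2 (by simp [hs, hne])]

-- the invariant-carrying characterisation of A's loop
lemma pv_A_loop (xs : List String) : ∀ (k : Int) (u : List String)
    (m : PySem.Dict Int Int) (pos : PySem.Dict String Int),
    (∀ s, pos.get? s = (PySem.List.index? u s).map (fun n => (n : Int))) →
    ((PySem.List.enumerate xs k).foldl pvAStep (u, m, pos)).1 = PySem.Set.update u xs ∧
    ((PySem.List.enumerate xs k).foldl pvAStep (u, m, pos)).2.1 =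
      (PySem.List.enumerate xs k).foldl
        (fun d p => d.insert p.1 (pvIdx (PySem.Set.update u xs) p.2)) m := by
  induction xs with
  | nil => intro k u m pos h; simp [PySem.List.enumerate_nil, PySem.Set.update_nil]
  | cons x xs ih =>
    intro k u m pos h
    rw [PySem.List.enumerate_cons]
    simp only [List.foldl_cons]
    by_cases hx : x ∈ u
    · -- pos hits: j = index of x in u
      obtain ⟨n, hn⟩ := Option.isSome_iff_exists.mp ((PySem.List.index?_isSome_iff u x).mpr hx)
      have hn' : List.idxOf? x u = some n := by simpa using hn
      have hstep : pvAStep (u, m, pos) (k, x) = (u, m.insert k (n : Int), pos) := by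
        simp [pvAStep, h x, hn']
      have hupd : PySem.Set.update u (x :: xs) = PySem.Set.update u xs := by
        rw [PySem.Set.update_cons, PySem.Set.add_of_mem hx]
      have hidx : pvIdx (PySem.Set.update u xs) x = (n : Int) := by
        unfold pvIdx
        rw [pv_index?_update_of_mem u xs x hx, hn]
        rfl
      rw [hstep]
      obtain ⟨h1, h2⟩ := ih (k + 1) u (m.insert k (n : Int)) pos h
      constructor
      · rw [hupd]; exact h1
      · rw [hupd, hidx]; exact h2
    · -- pos misses: x is appended to uniq
      have hstep : pvAStep (u, m, pos) (k, x) =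
          (u ++ [x], m.insert k (u.length : Int), pos.insert x (u.length : Int)) := by
        have hx' : List.idxOf? x u = none := by
          simpa using (PySem.List.index?_eq_none_iff u x).mpr hx
        simp [pvAStep, h x, hx']
      have hpos' : ∀ s, (pos.insert x (u.length : Int)).get? s =
          (PySem.List.index? (u ++ [x]) s).map (fun n => (n : Int)) := by
        intro s
        by_cases hs : s = x
        · rw [hs, PySem.Dict.get?_insert_self, PySem.List.index?_append_singleton_self u x hx]
          rfl
        · rw [PySem.Dict.get?_insert_of_ne pos _ hs,
            pv_index?_append_singleton u x s hs, h s]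
      have hupd : PySem.Set.update u (x :: xs) = PySem.Set.update (u ++ [x]) xs := by
        rw [PySem.Set.update_cons, PySem.Set.add_of_not_mem hx]
      have hidx : pvIdx (PySem.Set.update (u ++ [x]) xs) x = (u.length : Int) := by
        unfold pvIdx
        rw [pv_index?_update_of_mem (u ++ [x]) xs x (by simp),
          PySem.List.index?_append_singleton_self u x hx]
        rfl
      rw [hstep]
      obtain ⟨h1, h2⟩ := ih (k + 1) (u ++ [x]) (m.insert k (u.length : Int))
        (pos.insert x (u.length : Int)) hpos'
      constructor
      · rw [hupd]; exact h1
      · rw [hupd, hidx]; exact h2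

-- the first components of enumerate are pairwise distinct
lemma pv_nodup_fst_enumerate {α : Type} (xs : List α) (k : Int) :
    ((PySem.List.enumerate xs k).map (fun p : Int × α => p.1)).Nodup := by
  have h2 : ((PySem.List.enumerate xs k).map (fun p : Int × α => p.1)).Pairwise (· < ·) :=
    List.pairwise_map.mpr (PySem.List.pairwise_lt_enumerate xs k)
  exact h2.imp ne_of_lt

-- closed form of A
lemma pv_A_closed (seqs : List String) :
    unique_seqs_py seqs = (PySem.Set.ofList seqs,
      (PySem.List.enumerate seqs).map
        (fun p => (p.1, pvIdx (PySem.Set.ofList seqs) p.2))) := by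
  obtain ⟨h1, h2⟩ := pv_A_loop seqs 0 [] PySem.Dict.empty PySem.Dict.empty
    (by intro s; simp [PySem.Dict.get?_empty])
  unfold unique_seqs_py
  refine Prod.ext ?_ ?_
  · simpa [PySem.Set.update_nil_left] using h1
  · show ((PySem.List.enumerate seqs 0).foldl pvAStep
      ([], PySem.Dict.empty, PySem.Dict.empty)).2.1.items = _
    rw [h2, PySem.Set.update_nil_left]
    refine Eq.trans (PySem.Dict.items_foldl_insert_fresh (PySem.List.enumerate seqs 0)
      (fun p => p.1) (fun p => pvIdx (PySem.Set.ofList seqs) p.2) PySem.Dict.empty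
      (fun a _ => rfl) (pv_nodup_fst_enumerate seqs 0)) ?_
    show [] ++ _ = _
    rw [List.nil_append]

-- Set.ofList of a one-element extension
lemma pv_ofList_append_singleton (l : List String) (x : String) :
    PySem.Set.ofList (l ++ [x]) = PySem.Set.add (PySem.Set.ofList l) x := by
  rw [PySem.Set.ofList_eq_foldl, List.foldl_append, ← PySem.Set.ofList_eq_foldl]
  rfl

-- keeping the elements not present in their preceding prefix is dedup
lemma pv_uniq_aux (xs : List String) : ∀ (pre : List String),
    PySem.Set.ofList pre ++ ((PySem.List.enumerate xs (pre.length : Int)).filter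
      (fun p => !(decide (p.2 ∈ PySem.List.slice (pre ++ xs) none (some p.1))))).map (fun p => p.2)
    = PySem.Set.update (PySem.Set.ofList pre) xs := by
  induction xs with
  | nil => intro pre; simp [PySem.List.enumerate_nil, PySem.Set.update_nil]
  | cons x xs ih =>
    intro pre
    have hcast : ((pre ++ [x]).length : Int) = (pre.length : Int) + 1 := by simp
    have hsplit : pre ++ x :: xs = (pre ++ [x]) ++ xs := by simp
    have hslice : PySem.List.slice (pre ++ x :: xs) none (some (pre.length : Int)) = pre := by
      rw [PySem.List.slice_to _ (by positivity), Int.toNat_natCast]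
      exact List.take_left
    rw [PySem.List.enumerate_cons, List.filter_cons]
    by_cases hx : x ∈ pre
    · rw [if_neg (by simp [hslice, hx])]
      have := ih (pre ++ [x])
      rw [hcast, ← hsplit, pv_ofList_append_singleton,
        PySem.Set.add_of_mem (by rw [PySem.Set.mem_ofList]; exact hx)] at this
      rw [this, PySem.Set.update_cons,
        PySem.Set.add_of_mem (by rw [PySem.Set.mem_ofList]; exact hx)]
    · rw [if_pos (by simp [hslice, hx])]
      have hxo : x ∉ PySem.Set.ofList pre := by rw [PySem.Set.mem_ofList]; exact hx
      have := ih (pre ++ [x])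
      rw [hcast, ← hsplit, pv_ofList_append_singleton, PySem.Set.add_of_not_mem hxo] at this
      rw [List.map_cons, PySem.Set.update_cons, PySem.Set.add_of_not_mem hxo, ← this,
        List.append_cons]

-- ---- B-side abbreviations (proof-only) ----

-- element at j (j < seqs.length wherever it is used)
def pvGetS (seqs : List String) (j : Nat) : String := seqs.getD j ""
-- index of the first occurrence of string s (s ∈ seqs wherever it is used)
def pvMin (seqs : List String) (s : String) : Nat := (PySem.List.index? seqs s).getD 0
-- index of the first occurrence of the element at j
def pvFOcc (seqs : List String) (j : Nat) : Nat := pvMin seqs (pvGetS seqs j)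
-- positions of s, ascending
def pvOcc (seqs : List String) (s : String) : List Nat :=
  (List.range seqs.length).filter (fun j => pvGetS seqs j == s)
-- first-occurrence positions, ascending
def pvF (seqs : List String) : List Nat :=
  (List.range seqs.length).filter (fun j => pvFOcc seqs j == j)

lemma pv_getS_eq (seqs : List String) {j : Nat} (hj : j < seqs.length) :
    pvGetS seqs j = seqs[j] := List.getD_eq_getElem _ _ hj

lemma pv_index?_first (seqs : List String) (s : String) (j : Nat) (hj : j < seqs.length)
    (hsj : seqs[j] = s) (hmin : ∀ k (hk : k < j), seqs[k]'(by omega) ≠ s) :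
    PySem.List.index? seqs s = some j := by
  rw [PySem.List.index?_eq_some_iff]
  refine ⟨seqs.take j, seqs.drop (j + 1), ?_, by simp [hj.le], ?_⟩
  · conv_lhs => rw [← List.take_append_drop j seqs]
    rw [List.drop_eq_getElem_cons hj, hsj]
  · intro hmem
    obtain ⟨k, hk, hke⟩ := List.mem_iff_getElem.mp hmem
    have hk' : k < j := lt_of_lt_of_le hk (by simp)
    exact hmin k hk' (by rw [List.getElem_take] at hke; exact hke)

lemma pv_min_spec (seqs : List String) (s : String) (hs : s ∈ seqs) :
    pvMin seqs s < seqs.length ∧ pvGetS seqs (pvMin seqs s) = s ∧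
      ∀ k, k < pvMin seqs s → pvGetS seqs k ≠ s := by
  obtain ⟨m, hm⟩ := Option.isSome_iff_exists.mp ((PySem.List.index?_isSome_iff seqs s).mpr hs)
  obtain ⟨hk, hgs, hlt⟩ := PySem.List.getElem_of_index?_eq_some hm
  have hmin : pvMin seqs s = m := by unfold pvMin; rw [hm]; rfl
  refine ⟨by omega, ?_, ?_⟩
  · rw [hmin]; unfold pvGetS; rw [List.getD_eq_getElem _ _ hk]; exact hgs
  · intro k hklt
    rw [hmin] at hklt
    have hk2 : k < seqs.length := by omega
    unfold pvGetS; rw [List.getD_eq_getElem _ _ hk2]; exact hlt k hklt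

lemma pv_getS_mem (seqs : List String) (j : Nat) (hj : j < seqs.length) :
    pvGetS seqs j ∈ seqs := by
  rw [pvGetS, List.getD_eq_getElem _ _ hj]; exact List.getElem_mem _

lemma pv_fOcc_lt (seqs : List String) (j : Nat) (hj : j < seqs.length) :
    pvFOcc seqs j < seqs.length := by
  unfold pvFOcc; exact (pv_min_spec seqs _ (pv_getS_mem seqs j hj)).1

lemma pv_getS_fOcc (seqs : List String) (j : Nat) (hj : j < seqs.length) :
    pvGetS seqs (pvFOcc seqs j) = pvGetS seqs j := by
  unfold pvFOcc; exact (pv_min_spec seqs _ (pv_getS_mem seqs j hj)).2.1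

lemma pv_fOcc_idem (seqs : List String) (j : Nat) (hj : j < seqs.length) :
    pvFOcc seqs (pvFOcc seqs j) = pvFOcc seqs j := by
  show pvMin seqs (pvGetS seqs (pvFOcc seqs j)) = pvFOcc seqs j
  rw [pv_getS_fOcc seqs j hj]
  rfl

lemma pv_mem_occ (seqs : List String) (s : String) (j : Nat) :
    j ∈ pvOcc seqs s ↔ j < seqs.length ∧ pvGetS seqs j = s := by
  simp [pvOcc, List.mem_filter]

lemma pv_occ_eq_cons (seqs : List String) (s : String) (hs : s ∈ seqs) :
    ∃ t, pvOcc seqs s = pvMin seqs s :: t := by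
  obtain ⟨hlt, hget, hmin⟩ := pv_min_spec seqs s hs
  have hn : seqs.length = pvMin seqs s + (seqs.length - pvMin seqs s) := by omega
  rw [pvOcc, hn, List.range_add]
  have hd : seqs.length - pvMin seqs s = (seqs.length - pvMin seqs s - 1) + 1 := by omega
  rw [List.filter_append, List.filter_eq_nil_iff.mpr (by
    intro a ha
    simp only [List.mem_range] at ha
    simpa using hmin a ha)]
  rw [hd, List.range_succ_eq_map, List.map_cons, List.filter_cons]
  simp only [Nat.add_zero, beq_iff_eq]
  rw [if_pos (by simpa using hget)]
  exact ⟨_, rfl⟩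

lemma pv_mem_F (seqs : List String) (j : Nat) :
    j ∈ pvF seqs ↔ j < seqs.length ∧ pvFOcc seqs j = j := by
  simp [pvF, List.mem_filter]

lemma pv_fOcc_mem_F (seqs : List String) (j : Nat) (hj : j < seqs.length) :
    pvFOcc seqs j ∈ pvF seqs :=
  (pv_mem_F seqs _).mpr ⟨pv_fOcc_lt seqs j hj, pv_fOcc_idem seqs j hj⟩

def pvStrs (seqs : List String) : List String :=
  PySem.List.sorted (PySem.Set.ofList seqs) (fun x => x)
def pvOccI (seqs : List String) (s : String) : List Int :=
  (pvOcc seqs s).map (fun (j : Nat) => (j : Int))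
def pvC (seqs : List String) : List (String × Int) :=
  (pvStrs seqs).flatMap (fun s => (pvOccI seqs s).map (fun i => (s, i)))

lemma pv_strs_pairwise (seqs : List String) : (pvStrs seqs).Pairwise (· < ·) :=
  PySem.List.sorted_ofList_pairwise_lt seqs

lemma pv_mem_strs (seqs : List String) (s : String) : s ∈ pvStrs seqs ↔ s ∈ seqs := by
  rw [pvStrs, PySem.List.mem_sorted, PySem.Set.mem_ofList]

lemma pv_lex_cmp : (fun (a b : String × Int) =>
      (decide (a.1 < b.1) || (!decide (b.1 < a.1) && decide (a.2 < b.2))))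
    = fun a b => decide ((toLex a : Lex (String × Int)) < toLex b) := by
  funext a b
  by_cases h1 : a.1 < b.1
  · simp [h1, Prod.Lex.toLex_lt_toLex]
  · by_cases h2 : b.1 < a.1
    · simp [h1, h2, Prod.Lex.toLex_lt_toLex, ne_of_gt h2]
    · have he : a.1 = b.1 := le_antisymm (not_lt.mp h2) (not_lt.mp h1)
      by_cases h3 : a.2 < b.2 <;> simp [h3, he, Prod.Lex.toLex_lt_toLex]

lemma pv_sorted2_eq (xs : List (String × Int)) :
    PySem.List.sorted2 xs Prod.fst Prod.snd
      = PySem.List.sorted xs (fun a => (toLex a : Lex (String × Int))) := by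
  rw [PySem.List.sorted_eq_foldl_insertBy]
  show xs.foldl (fun acc x => PySem.List.insertBy (fun a b =>
    (decide (a.1 < b.1) || (!decide (b.1 < a.1) && decide (a.2 < b.2)))) x acc) [] = _
  rw [pv_lex_cmp]

lemma pv_C_pairwise (seqs : List String) :
    (pvC seqs).Pairwise (fun a b => (toLex a : Lex (String × Int)) < toLex b) := by
  rw [pvC, List.pairwise_flatMap]
  constructor
  · intro s hs
    have hocc : (pvOccI seqs s).Pairwise (· < ·) := by
      unfold pvOccI
      refine List.pairwise_map.mpr ?_
      unfold pvOcc
      exact ((List.pairwise_lt_range).filter _).imp (fun h => by exact_mod_cast h)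
    exact List.Pairwise.map _ (fun a b (h : a < b) => by
      rw [Prod.Lex.toLex_lt_toLex]; exact Or.inr ⟨rfl, h⟩) hocc
  · refine (pv_strs_pairwise seqs).imp ?_
    intro s1 s2 h12 x hx y hy
    obtain ⟨i, _, rfl⟩ := List.mem_map.mp hx
    obtain ⟨i', _, rfl⟩ := List.mem_map.mp hy
    rw [Prod.Lex.toLex_lt_toLex]
    exact Or.inl h12

lemma pv_mem_plist (seqs : List String) (x : String × Int) :
    x ∈ (PySem.List.enumerate seqs).map (fun p => (p.2, p.1)) ↔
      ∃ j, ∃ (_hj : j < seqs.length), x = (pvGetS seqs j, (j : Int)) := by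
  rw [List.mem_map]
  constructor
  · rintro ⟨p, hp, rfl⟩
    rw [PySem.List.mem_enumerate_iff] at hp
    obtain ⟨k, hk, rfl⟩ := hp
    exact ⟨k, hk, by rw [pv_getS_eq seqs hk]; simp⟩
  · rintro ⟨j, hj, rfl⟩
    refine ⟨((j : Int), pvGetS seqs j), ?_, rfl⟩
    rw [PySem.List.mem_enumerate_iff]
    exact ⟨j, hj, by rw [pv_getS_eq seqs hj]; simp⟩

lemma pv_mem_C (seqs : List String) (x : String × Int) :
    x ∈ pvC seqs ↔ ∃ j, ∃ (_hj : j < seqs.length), x = (pvGetS seqs j, (j : Int)) := by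
  simp only [pvC, List.mem_flatMap, List.mem_map, pvOccI, pv_mem_strs, pv_mem_occ]
  constructor
  · rintro ⟨s, hs, i, ⟨j, ⟨hj, hgs⟩, rfl⟩, rfl⟩
    exact ⟨j, hj, by rw [hgs]⟩
  · rintro ⟨j, hj, rfl⟩
    exact ⟨pvGetS seqs j, pv_getS_mem seqs j hj, (j : Int), ⟨j, ⟨hj, rfl⟩, rfl⟩, rfl⟩



lemma pv_run_fold (s : String) (js : List Nat) : ∀ (l : List Int) (run : Int),
    (js.map (fun (j : Nat) => (s, (j : Int)))).foldl pvBStep (l, run, some s)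
      = (js.foldl (fun l j => l.set j run) l, run, some s) := by
  induction js with
  | nil => intro l run; rfl
  | cons j t ih =>
    intro l run
    simp only [List.map_cons, List.foldl_cons]
    have hstep : pvBStep (l, run, some s) (s, (j : Int)) = (l.set j run, run, some s) := by
      simp [pvBStep, pvSetAt]
    rw [hstep, ih]

lemma pv_sets_fold_char (js : List Nat) (v : Int) : ∀ (l : List Int),
    (js.foldl (fun l j => l.set j v) l).length = l.length ∧
    ∀ k : Nat, (js.foldl (fun l j => l.set j v) l)[k]? =
      if k ∈ js ∧ k < l.length then some v else l[k]? := by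
  induction js with
  | nil => intro l; simp
  | cons j t ih =>
    intro l
    simp only [List.foldl_cons]
    obtain ⟨ihl, ihg⟩ := ih (l.set j v)
    refine ⟨by rw [ihl]; simp, ?_⟩
    intro k
    rw [ihg k]
    simp only [List.length_set, List.getElem?_set, List.mem_cons]
    by_cases hk : k < l.length
    · by_cases hkt : k ∈ t
      · simp [hkt, hk]
      · by_cases hkj : j = k
        · simp [hkt, hkj, hk]
        · have hc : ¬ ((k = j ∨ k ∈ t) ∧ k < l.length) := by
            rintro ⟨h | h, _⟩
            · exact hkj h.symm
            · exact hkt h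
          simp only [eq_false hkt, eq_false (fun (h : k = j) => hkj h.symm)]
          simp only [false_or, false_and, if_false]
          rw [if_neg hkj]
    · by_cases hkj : j = k
      · simp [hk, hkj]
      · simp [hk, hkj]

lemma pv_group_fold (seqs : List String) (s : String) (hs : s ∈ seqs)
    (l : List Int) (run : Int) (prev : Option String) (hprev : prev ≠ some s) :
    ((pvOccI seqs s).map (fun i => (s, i))).foldl pvBStep (l, run, prev)
      = ((pvOcc seqs s).foldl (fun l j => l.set j (pvMin seqs s : Int)) l,
          (pvMin seqs s : Int), some s) := by
  obtain ⟨t, ht⟩ := pv_occ_eq_cons seqs s hs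
  have hmap : (pvOccI seqs s).map (fun i => (s, i))
      = (pvOcc seqs s).map (fun (j : Nat) => (s, (j : Int))) := by
    rw [pvOccI, List.map_map]; rfl
  rw [hmap, ht]
  simp only [List.map_cons, List.foldl_cons]
  have hstep : pvBStep (l, run, prev) (s, ((pvMin seqs s : Nat) : Int))
      = (l.set (pvMin seqs s) ((pvMin seqs s : Nat) : Int), ((pvMin seqs s : Nat) : Int), some s) := by
    rcases Option.eq_none_or_eq_some prev with h | ⟨a, h⟩
    · subst h; simp [pvBStep, pvSetAt]
    · subst h
      have hne : ¬ (a = s) := fun h => hprev (by rw [h])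
      simp [pvBStep, pvSetAt, hne]
  rw [hstep, pv_run_fold]

lemma pv_groups_fold (seqs : List String) : ∀ (gs : List String) (l : List Int)
    (run : Int) (prev : Option String), gs.Nodup → (∀ s ∈ gs, s ∈ seqs) →
    (∀ s ∈ gs, prev ≠ some s) → l.length = seqs.length →
    ∀ k : Nat, ((gs.flatMap (fun s => (pvOccI seqs s).map (fun i => (s, i)))).foldl
        pvBStep (l, run, prev)).1[k]? =
      if k < seqs.length ∧ pvGetS seqs k ∈ gs then some ((pvFOcc seqs k : Int)) else l[k]? := by
  intro gs
  induction gs with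
  | nil => intro l run prev _ _ _ _ k; simp
  | cons s gs ih =>
    intro l run prev hnd hmem hprev hlen k
    rw [List.flatMap_cons, List.foldl_append]
    rw [pv_group_fold seqs s (hmem s List.mem_cons_self) l run prev (hprev s List.mem_cons_self)]
    obtain ⟨hl', hg'⟩ := pv_sets_fold_char (pvOcc seqs s) ((pvMin seqs s : Nat) : Int) l
    rw [ih _ _ _ (List.nodup_cons.mp hnd).2 (fun a ha => hmem a (List.mem_cons_of_mem _ ha))
      (fun a ha (h : some s = some a) => (List.nodup_cons.mp hnd).1
        (by cases h; exact ha)) (by rw [hl', hlen]) k]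
    rw [hg' k]
    by_cases hk : k < seqs.length
    · by_cases hgs : pvGetS seqs k ∈ gs
      · rw [if_pos ⟨hk, hgs⟩, if_pos ⟨hk, List.mem_cons_of_mem _ hgs⟩]
      · rw [if_neg (by rintro ⟨_, h⟩; exact hgs h)]
        by_cases hks : pvGetS seqs k = s
        · have hko : k ∈ pvOcc seqs s := (pv_mem_occ seqs s k).mpr ⟨hk, hks⟩
          rw [if_pos ⟨hko, by omega⟩, if_pos ⟨hk, by rw [hks]; exact List.mem_cons_self⟩]
          have : pvFOcc seqs k = pvMin seqs s := by unfold pvFOcc; rw [hks]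
          rw [this]
        · have hko : k ∉ pvOcc seqs s := fun h => hks ((pv_mem_occ seqs s k).mp h).2
          have hc2 : ¬ (k < seqs.length ∧ pvGetS seqs k ∈ s :: gs) := by
            rintro ⟨_, h⟩
            rcases List.mem_cons.mp h with h | h
            · exact hks h
            · exact hgs h
          rw [if_neg (by rintro ⟨h, _⟩; exact hko h), if_neg hc2]
    · have h1 : ¬ (k < seqs.length ∧ pvGetS seqs k ∈ gs) := by rintro ⟨h, _⟩; omega
      have h2 : ¬ (k < seqs.length ∧ pvGetS seqs k ∈ s :: gs) := by rintro ⟨h, _⟩; omega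
      have h3 : ¬ (k ∈ pvOcc seqs s ∧ k < l.length) := by
        rintro ⟨h, _⟩; exact absurd ((pv_mem_occ seqs s k).mp h).1 hk
      rw [if_neg h1, if_neg h3, if_neg h2]

def pvFO (seqs : List String) : List Int :=
  (List.range seqs.length).map (fun j => (pvFOcc seqs j : Int))
def pvFI (seqs : List String) : List Int := (pvF seqs).map (fun (j : Nat) => (j : Int))

lemma pv_strs_nodup (seqs : List String) : (pvStrs seqs).Nodup :=
  (pv_strs_pairwise seqs).imp ne_of_lt

lemma pv_owner_eq (seqs : List String) :
    ((pvC seqs).foldl pvBStep (List.replicate seqs.length (0 : Int), (0 : Int),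
      (none : Option String))).1 = pvFO seqs := by
  refine List.ext_getElem? ?_
  intro k
  rw [pvC, pv_groups_fold seqs (pvStrs seqs) _ _ _ (pv_strs_nodup seqs)
    (fun a ha => (pv_mem_strs seqs a).mp ha) (fun a _ => by simp) (by simp) k]
  by_cases hk : k < seqs.length
  · rw [if_pos ⟨hk, (pv_mem_strs seqs _).mpr (pv_getS_mem seqs k hk)⟩, pvFO,
      List.getElem?_map, List.getElem?_range hk]
    rfl
  · rw [if_neg (by rintro ⟨h, _⟩; omega)]
    rw [List.getElem?_eq_none (by simpa using (by omega : seqs.length ≤ k)),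
      List.getElem?_eq_none (by simp [pvFO]; omega)]

lemma pv_mem_FO_iff_FI (seqs : List String) (x : Int) :
    x ∈ pvFO seqs ↔ x ∈ pvFI seqs := by
  rw [pvFO, pvFI]
  constructor
  · intro hx
    obtain ⟨j, hj, rfl⟩ := List.mem_map.mp hx
    rw [List.mem_range] at hj
    exact List.mem_map_of_mem ((pv_mem_F seqs _).mpr
      ⟨pv_fOcc_lt seqs j hj, pv_fOcc_idem seqs j hj⟩)
  · intro hx
    obtain ⟨j, hj, rfl⟩ := List.mem_map.mp hx
    obtain ⟨hjl, hfix⟩ := (pv_mem_F seqs j).mp hj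
    exact List.mem_map.mpr ⟨j, List.mem_range.mpr hjl, by rw [hfix]⟩

lemma pv_F_pairwise (seqs : List String) : (pvF seqs).Pairwise (· < ·) :=
  (List.pairwise_lt_range).filter _

lemma pv_FI_pairwise (seqs : List String) : (pvFI seqs).Pairwise (· < ·) :=
  List.Pairwise.map _ (fun a b (h : a < b) => by exact_mod_cast h) (pv_F_pairwise seqs)

lemma pv_firsts_eq (seqs : List String) :
    PySem.List.sorted (PySem.Set.ofList (pvFO seqs)) (fun x => x) = pvFI seqs := by
  refine PySem.List.sorted_eq_of_perm_of_pairwise_lt _ _ _ ?_ (pv_FI_pairwise seqs)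
  have hnFI : (pvFI seqs).Nodup := (pv_FI_pairwise seqs).imp ne_of_lt
  rw [List.perm_ext_iff_of_nodup hnFI (PySem.Set.nodup_ofList _)]
  intro x
  rw [PySem.Set.mem_ofList, pv_mem_FO_iff_FI]

lemma pv_enum_range (xs : List String) (k : Int) :
    PySem.List.enumerate xs k
      = (List.range xs.length).map (fun (j : Nat) => (k + (j : Int), pvGetS xs j)) := by
  induction xs generalizing k with
  | nil => simp [PySem.List.enumerate_nil]
  | cons x t ih =>
    rw [PySem.List.enumerate_cons, ih (k + 1)]
    rw [List.length_cons, List.range_succ_eq_map, List.map_cons, List.map_map]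
    refine congrArg₂ _ (by simp [pvGetS]) ?_
    refine List.map_congr_left ?_
    intro j _
    show ((k + 1) + (j : Int), pvGetS t j) = (k + ((j + 1 : Nat) : Int), pvGetS (x :: t) (j + 1))
    refine congrArg₂ _ (by push_cast; ring) (by simp [pvGetS])

lemma pv_first_iff (seqs : List String) (j : Nat) (hj : j < seqs.length) :
    (pvFOcc seqs j == j)
      = !(decide (pvGetS seqs j ∈ PySem.List.slice seqs none (some (j : Int)))) := by
  have hslice : PySem.List.slice seqs none (some (j : Int)) = seqs.take j := by
    rw [PySem.List.slice_to _ (by positivity), Int.toNat_natCast]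
  rw [hslice]
  by_cases hmem : pvGetS seqs j ∈ seqs.take j
  · obtain ⟨k, hk, hke⟩ := List.mem_iff_getElem.mp hmem
    have hkj : k < j := lt_of_lt_of_le hk (by simp)
    rw [List.getElem_take] at hke
    have hne : pvFOcc seqs j ≠ j := by
      obtain ⟨_, _, hmin⟩ := pv_min_spec seqs _ (pv_getS_mem seqs j hj)
      intro hfix
      have hklt : k < pvFOcc seqs j := by omega
      exact hmin k hklt (by rw [pv_getS_eq seqs (by omega)]; exact hke)
    simp [hmem, hne]
  · have hfix : pvFOcc seqs j = j := by
      have : PySem.List.index? seqs (pvGetS seqs j) = some j := by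
        refine pv_index?_first seqs _ j hj (pv_getS_eq seqs hj).symm ?_
        intro k hk hke
        exact hmem (by
          rw [← hke]
          exact List.mem_iff_getElem.mpr ⟨k, by rw [List.length_take]; omega,
            by rw [List.getElem_take]⟩)
      unfold pvFOcc pvMin
      rw [this]; rfl
    simp [hmem, hfix]

lemma pv_uniq_eq (seqs : List String) :
    (pvF seqs).map (pvGetS seqs) = PySem.Set.ofList seqs := by
  have h0 := pv_uniq_aux seqs []
  simp only [List.nil_append, List.length_nil, Nat.cast_zero,
    show PySem.Set.ofList ([] : List String) = [] from rfl] at h0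
  rw [PySem.Set.update_nil_left] at h0
  rw [← h0]
  rw [pv_enum_range seqs 0]
  rw [List.filter_map, List.map_map]
  have hfc : ∀ j ∈ List.range seqs.length, (pvFOcc seqs j == j) =
      ((fun p : Int × String => !(decide (p.2 ∈ PySem.List.slice seqs none (some p.1)))) ∘
        (fun (j : Nat) => ((0 : Int) + (j : Int), pvGetS seqs j))) j := by
    intro j hjr
    rw [List.mem_range] at hjr
    simp only [Function.comp_apply]
    rw [zero_add, ← pv_first_iff seqs j hjr]
  unfold pvF
  rw [List.filter_congr hfc]
  exact List.map_congr_left (fun j hj => rfl)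

lemma pv_index?_map_inj {α β : Type} [BEq α] [LawfulBEq α] [BEq β] [LawfulBEq β]
    (g : α → β) (x : α) : ∀ (l : List α), x ∈ l →
    (∀ a ∈ l, g a = g x → a = x) →
    PySem.List.index? (l.map g) (g x) = PySem.List.index? l x := by
  intro l
  induction l with
  | nil => intro h; cases h
  | cons a t ih =>
    intro hx hinj
    by_cases hax : a = x
    · subst hax
      rw [List.map_cons, PySem.List.index?_cons_self, PySem.List.index?_cons_self]
    · have hgax : g a ≠ g x := fun h => hax (hinj a List.mem_cons_self h)
      have hxt : x ∈ t := by
        rcases List.mem_cons.mp hx with h | h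
        · exact absurd h.symm hax
        · exact h
      rw [List.map_cons, PySem.List.index?_cons_of_ne _ hgax,
        PySem.List.index?_cons_of_ne _ hax,
        ih hxt (fun b hb hgb => hinj b (List.mem_cons_of_mem _ hb) hgb)]

lemma pv_rank_char (fs : List Int) : ∀ (k : Int) (l : List Int), fs.Nodup →
    (∀ f ∈ fs, 0 ≤ f ∧ f.toNat < l.length) →
    ∀ j : Nat, ((PySem.List.enumerate fs k).foldl (fun l p => pvSetAt l p.2 p.1) l)[j]? =
      if (j : Int) ∈ fs then some (k + (((PySem.List.index? fs (j : Int)).getD 0 : Nat) : Int))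
      else l[j]? := by
  induction fs with
  | nil => intro k l _ _ j; simp [PySem.List.enumerate_nil]
  | cons f t ih =>
    intro k l hnd hb j
    rw [PySem.List.enumerate_cons]
    simp only [List.foldl_cons]
    have hb' : ∀ g ∈ t, 0 ≤ g ∧ g.toNat < (pvSetAt l f k).length := by
      intro g hg
      obtain ⟨h1, h2⟩ := hb g (List.mem_cons_of_mem _ hg)
      exact ⟨h1, by simpa [pvSetAt] using h2⟩
    rw [ih (k + 1) (pvSetAt l f k) (List.nodup_cons.mp hnd).2 hb' j]
    obtain ⟨hf0, hfl⟩ := hb f List.mem_cons_self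
    by_cases hjf : (j : Int) = f
    · have hjt : (j : Int) ∉ t := by rw [hjf]; exact (List.nodup_cons.mp hnd).1
      have hjl : j < l.length := by omega
      rw [if_neg hjt, if_pos (by rw [hjf]; exact List.mem_cons_self), ← hjf,
        PySem.List.index?_cons_self]
      simp only [pvSetAt, Int.toNat_natCast, List.getElem?_set]
      rw [if_pos trivial, if_pos hjl]
      simp
    · by_cases hjt : (j : Int) ∈ t
      · rw [if_pos hjt, if_pos (List.mem_cons_of_mem _ hjt),
          PySem.List.index?_cons_of_ne _ (fun h => hjf h.symm)]
        obtain ⟨i, hi⟩ := Option.isSome_iff_exists.mp ((PySem.List.index?_isSome_iff t _).mpr hjt)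
        rw [hi]
        show some (k + 1 + (i : Int)) = some (k + ((i + 1 : Nat) : Int))
        refine congrArg _ (by push_cast; ring)
      · have hc : (j : Int) ∉ f :: t := by
          intro h
          rcases List.mem_cons.mp h with h | h
          · exact hjf h
          · exact hjt h
        rw [if_neg hjt, if_neg hc]
        have hfj : f.toNat ≠ j := fun h => hjf (by omega)
        simp only [pvSetAt, List.getElem?_set, if_neg hfj]

lemma pv_m_val (seqs : List String) (j : Nat) (hj : j < seqs.length) :
    ((PySem.List.pyGet? ((PySem.List.enumerate (pvFI seqs)).foldl
        (fun l p => pvSetAt l p.2 p.1) (List.replicate seqs.length (0 : Int)))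
      ((PySem.List.pyGet? (pvFO seqs) ((j : Nat) : Int)).getD 0)).getD 0)
      = pvIdx (PySem.Set.ofList seqs) (pvGetS seqs j) := by
  have h1 : (PySem.List.pyGet? (pvFO seqs) ((j : Nat) : Int)).getD 0
      = ((pvFOcc seqs j : Nat) : Int) := by
    rw [PySem.List.pyGet?_natCast, pvFO, List.getElem?_map, List.getElem?_range hj]
    rfl
  rw [h1, PySem.List.pyGet?_natCast]
  have hnodup : (pvFI seqs).Nodup := (pv_FI_pairwise seqs).imp ne_of_lt
  have hbounds : ∀ f ∈ pvFI seqs,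
      0 ≤ f ∧ f.toNat < (List.replicate seqs.length (0 : Int)).length := by
    intro f hf
    obtain ⟨a, ha, rfl⟩ := List.mem_map.mp hf
    obtain ⟨hal, _⟩ := (pv_mem_F seqs a).mp ha
    refine ⟨by positivity, ?_⟩
    rw [Int.toNat_natCast, List.length_replicate]
    exact hal
  rw [pv_rank_char (pvFI seqs) 0 _ hnodup hbounds (pvFOcc seqs j)]
  have hmemF : pvFOcc seqs j ∈ pvF seqs := pv_fOcc_mem_F seqs j hj
  have hmem : ((pvFOcc seqs j : Nat) : Int) ∈ pvFI seqs := List.mem_map_of_mem hmemF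
  rw [if_pos hmem]
  have hidx1 : PySem.List.index? (pvFI seqs) ((pvFOcc seqs j : Nat) : Int)
      = PySem.List.index? (pvF seqs) (pvFOcc seqs j) :=
    pv_index?_map_inj _ _ (pvF seqs) hmemF (fun a _ h => by exact_mod_cast h)
  have hidx2 : PySem.List.index? ((pvF seqs).map (pvGetS seqs)) (pvGetS seqs (pvFOcc seqs j))
      = PySem.List.index? (pvF seqs) (pvFOcc seqs j) :=
    pv_index?_map_inj _ _ (pvF seqs) hmemF (fun a ha h => by
      have ha' := (pv_mem_F seqs a).mp ha
      have h2 : pvFOcc seqs a = pvFOcc seqs (pvFOcc seqs j) := by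
        unfold pvFOcc; rw [h]; rfl
      rw [pv_fOcc_idem seqs j hj] at h2
      rw [← ha'.2, h2])
  rw [hidx1, pvIdx, ← pv_uniq_eq seqs, ← pv_getS_fOcc seqs j hj, hidx2]
  simp

lemma pv_pairs_eq (seqs : List String) : pvBPairs seqs = pvC seqs := by
  rw [pvBPairs, pv_sorted2_eq]
  refine PySem.List.sorted_eq_of_perm_of_pairwise_lt _ _ _ ?_ (pv_C_pairwise seqs)
  have hnC : (pvC seqs).Nodup :=
    (pv_C_pairwise seqs).imp (fun h => by rintro rfl; exact lt_irrefl _ h)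
  have hnP : ((PySem.List.enumerate seqs).map (fun p : Int × String => (p.2, p.1))).Nodup := by
    have h2 : ((PySem.List.enumerate seqs).map (fun p : Int × String => (p.2, p.1))).Pairwise
        (fun p q => p.2 < q.2) :=
      List.pairwise_map.mpr (PySem.List.pairwise_lt_enumerate seqs 0)
    exact h2.imp (fun h => by rintro rfl; exact lt_irrefl _ h)
  rw [List.perm_ext_iff_of_nodup hnC hnP]
  intro x
  rw [pv_mem_C, pv_mem_plist]

lemma pv_owner_B (seqs : List String) : pvBOwner seqs = pvFO seqs := by
  rw [pvBOwner, pv_pairs_eq, PySem.List.pyRepeat_singleton, Int.toNat_natCast]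
  exact pv_owner_eq seqs

lemma pv_firsts_B (seqs : List String) : pvBFirsts seqs = pvFI seqs := by
  rw [pvBFirsts, pv_owner_B, pv_firsts_eq]

set_option maxHeartbeats 1000000 in
lemma pv_B_closed (seqs : List String) :
    unique_seqs_py_alt seqs = (PySem.Set.ofList seqs,
      (PySem.List.enumerate seqs).map
        (fun p => (p.1, pvIdx (PySem.Set.ofList seqs) p.2))) := by
  unfold unique_seqs_py_alt
  refine Prod.ext ?_ ?_
  · show (pvBFirsts seqs).map (fun f => (PySem.List.pyGet? seqs f).getD "") = _
    rw [pv_firsts_B, pvFI, List.map_map, ← pv_uniq_eq seqs]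
    refine List.map_congr_left ?_
    intro a _
    show (PySem.List.pyGet? seqs ((a : Nat) : Int)).getD "" = pvGetS seqs a
    rw [PySem.List.pyGet?_natCast]
    rfl
  · show ((PySem.List.pyRange 0 (seqs.length : Int)).foldl
      (fun d i => d.insert i
        ((PySem.List.pyGet? (pvBRank seqs)
          ((PySem.List.pyGet? (pvBOwner seqs) i).getD 0)).getD 0))
      PySem.Dict.empty).items = _
    have hrank : pvBRank seqs = (PySem.List.enumerate (pvFI seqs)).foldl
        (fun l p => pvSetAt l p.2 p.1) (List.replicate seqs.length (0 : Int)) := by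
      rw [pvBRank, pv_firsts_B, PySem.List.pyRepeat_singleton, Int.toNat_natCast]
    rw [PySem.List.pyRange_zero_natCast]
    have hnod : (((List.range seqs.length).map (fun (k : Nat) => (k : Int))).map
        (fun (i : Int) => i)).Nodup := by
      rw [List.map_id']
      exact (List.Pairwise.map _ (fun a b (h : a < b) => by exact_mod_cast h)
        (List.pairwise_lt_range)).imp ne_of_lt
    refine Eq.trans (PySem.Dict.items_foldl_insert_fresh
      ((List.range seqs.length).map (fun (k : Nat) => (k : Int))) (fun i => i)
      (fun i => ((PySem.List.pyGet? (pvBRank seqs)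
        ((PySem.List.pyGet? (pvBOwner seqs) i).getD 0)).getD 0))
      PySem.Dict.empty (fun a _ => rfl) hnod) ?_
    show [] ++ _ = _
    rw [List.nil_append, pv_enum_range seqs 0, List.map_map, List.map_map]
    refine List.map_congr_left ?_
    intro j hjr
    rw [List.mem_range] at hjr
    show ((j : Int), (PySem.List.pyGet? (pvBRank seqs)
        ((PySem.List.pyGet? (pvBOwner seqs) ((j : Nat) : Int)).getD 0)).getD 0)
      = ((0 : Int) + (j : Int), pvIdx (PySem.Set.ofList seqs) (pvGetS seqs j))
    refine congrArg₂ _ (by ring) ?_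
    rw [pv_owner_B, hrank]
    exact pv_m_val seqs j hjr


-- ===== VERDICT (by name: the statement is the Claim_ definition above) =====
theorem unique_seqs_py_spec : Claim_equal_unique_seqs_py := by
  intro seqs _
  show unique_seqs_py seqs = unique_seqs_py_alt seqs
  rw [pv_A_closed, pv_B_closed]
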